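-- pv_equiv track=rewrite | github.com/dgoffredo/leetcode | shortest-palindrome/quadratic.py | shortest_palindromizing_prefix
-- ===== SOURCE A (Python) =====
-- def shortest_palindromizing_prefix(text):
--     """Return the shortest (possibly empty) string that can be prepended to the
--     specified `text` in order to make the resulting total string a palindrome.
--     """
--     prefix = ''
--     for char in reversed(text):
--         if is_palindrome(prefix + text):
--             break
--         else:
--             prefix += char
--
--     return prefix
--
-- def is_palindrome(text):
--     return reversed_str(text) == text
--
-- def reversed_str(text):
--     return text[::-1]
-- ===== SOURCE B (Python) =====
-- def shortest_palindromizing_prefix(text):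
--     rev = text[::-1]
--     for i in range(len(text)):
--         if text.startswith(rev[i:]):
--             return rev[:i]
--     return rev
-- ===== Notes on version B (the rewrite author's own statement) =====
-- stated objective: faster
-- what changed: B reverses the text once and finds the longest palindromic prefix by testing whether rev[i:] is a prefix of text (startswith), instead of rebuilding the candidate string prefix+text and reversing all of it at every loop step as A does.
import Mathlib
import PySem

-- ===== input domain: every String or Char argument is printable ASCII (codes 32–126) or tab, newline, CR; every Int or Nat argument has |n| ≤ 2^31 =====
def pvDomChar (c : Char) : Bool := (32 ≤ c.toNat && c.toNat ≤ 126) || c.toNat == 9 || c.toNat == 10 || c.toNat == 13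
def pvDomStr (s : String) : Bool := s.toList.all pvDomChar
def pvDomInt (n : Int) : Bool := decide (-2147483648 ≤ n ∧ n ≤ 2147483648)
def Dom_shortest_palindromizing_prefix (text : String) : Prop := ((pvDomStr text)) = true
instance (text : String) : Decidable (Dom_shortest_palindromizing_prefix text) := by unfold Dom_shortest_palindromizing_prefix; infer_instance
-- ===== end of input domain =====

-- B reverses the text once and scans for the longest palindromic prefix with startswith,
-- instead of rebuilding and reversing the whole candidate string at every step (objective: faster, constant factor).


-- ===== PORT A =====
-- reversed_str(text) = text[::-1]; step -1 ≠ 0 so slice? never returns none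
def reversed_str (text : String) : String :=
  match PySem.Str.slice? text none none (-1) with
  | some r => r
  | none => ""

def is_palindrome (text : String) : Bool :=
  reversed_str text == text

-- the 'for char in reversed(text)' loop with its early break
def spLoopA (text : String) : List Char → String → String
  | [], prefx => prefx
  | c :: rest, prefx =>
    if is_palindrome (prefx ++ text) then prefx
    else spLoopA text rest (prefx.push c)

def shortest_palindromizing_prefix (text : String) : String :=
  spLoopA text text.toList.reverse ""

-- ===== PORT B =====
-- the 'for i in range(len(text))' loop with its early return; [] falls through to 'return rev'
def spLoopB (text rev : String) : List Int → String
  | [] => rev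
  | i :: rest =>
    if PySem.Str.startswith text (PySem.Str.slice rev (some i) none) then
      PySem.Str.slice rev none (some i)
    else spLoopB text rev rest

def shortest_palindromizing_prefix_alt (text : String) : String :=
  let rev := match PySem.Str.slice? text none none (-1) with
    | some r => r
    | none => ""
  spLoopB text rev (PySem.List.pyRange 0 (PySem.Str.len text) 1)

-- ===== PRECONDITION & SPEC =====
def Spec_shortest_palindromizing_prefix (text : String) (out : String) : Prop := out = shortest_palindromizing_prefix_alt text
instance (text : String) (out : String) : Decidable (Spec_shortest_palindromizing_prefix text out) := by unfold Spec_shortest_palindromizing_prefix; infer_instance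

-- ===== CLAIM (what is proved, stated in full; the proofs are below) =====
def Claim_equal_shortest_palindromizing_prefix : Prop := ∀ (text : String), Dom_shortest_palindromizing_prefix text → Spec_shortest_palindromizing_prefix text (shortest_palindromizing_prefix text)

-- ===== LEMMAS AND PROOFS =====

-- the mathematical heart, split of the palindrome condition: rev(d) ++ (p ++ d) is a
-- palindrome iff p is.
theorem pal_split (p d : List Char) :
    ((d.reverse ++ (p ++ d)).reverse = d.reverse ++ (p ++ d)) ↔ p.reverse = p := by
  rw [List.reverse_append, List.reverse_append, List.reverse_reverse]
  constructor
  · intro h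
    rw [List.append_assoc] at h
    simpa using h
  · intro h
    rw [List.append_assoc, h]

-- prepending the reversed last j characters yields a palindrome iff what the back-read
-- suffix leaves over — the first (length - j) characters — is itself a palindrome,
-- i.e. iff rev(text)[j:] is a prefix of text.
theorem pal_iff (l : List Char) (j : Nat) :
    ((l.reverse.take j ++ l).reverse = l.reverse.take j ++ l) ↔ l.reverse.drop j <+: l := by
  have hm : l.length - j ≤ l.length := Nat.sub_le _ _
  rw [List.take_reverse, List.drop_reverse]
  constructor
  · intro h
    have h' : (l.take (l.length - j)).reverse = l.take (l.length - j) := by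
      apply (pal_split (l.take (l.length - j)) (l.drop (l.length - j))).mp
      rw [List.take_append_drop]
      exact h
    rw [h']
    exact List.take_prefix _ _
  · intro h
    have h' : (l.take (l.length - j)).reverse = l.take (l.length - j) := by
      have h2 := List.prefix_iff_eq_take.mp h
      rw [h2, List.length_reverse, List.length_take, Nat.min_eq_left hm]
    have h3 := (pal_split (l.take (l.length - j)) (l.drop (l.length - j))).mpr h'
    rwa [List.take_append_drop] at h3

-- the two loop conditions are the same Bool
theorem cond_eq (text : String) (j : Nat) :
    is_palindrome (String.ofList (text.toList.reverse.take j) ++ text)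
      = PySem.Str.startswith text
          (PySem.Str.slice (String.ofList text.toList.reverse) (some (j : Int)) none) := by
  have hslice : (PySem.Str.slice (String.ofList text.toList.reverse) (some (j : Int)) none).toList
      = text.toList.reverse.drop j := by
    simp [PySem.Str.toList_slice, PySem.Chars.slice_eq_listSlice, PySem.List.slice_from_natCast]
  rw [Bool.eq_iff_iff]
  unfold is_palindrome reversed_str
  rw [PySem.Str.slice?_none_none_neg_one]
  simp only [beq_iff_eq, PySem.Str.startswith_eq, hslice, PySem.Chars.startswith_iff]
  constructor
  · intro h
    have h2 := congrArg String.toList h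
    simp only [String.toList_ofList, String.toList_append] at h2
    exact (pal_iff text.toList j).mp h2
  · intro h
    apply String.toList_inj.mp
    simp only [String.toList_ofList, String.toList_append]
    exact (pal_iff text.toList j).mpr h

-- parallel induction over the two loops: at step j, A carries the reversed last j
-- characters as its prefix, B is about to test index j of range(len(text)).
theorem loop_eq (text : String) : ∀ (k j : Nat), j ≤ text.toList.length →
    text.toList.length - j = k →
    spLoopA text (text.toList.reverse.drop j) (String.ofList (text.toList.reverse.take j))
      = spLoopB text (String.ofList text.toList.reverse)
          (PySem.List.pyRange (j : Int) (text.toList.length : Int) 1) := by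
  intro k
  induction k with
  | zero =>
    intro j hj hfuel
    have hjn : j = text.toList.length := by omega
    subst hjn
    have hdrop : text.toList.reverse.drop text.toList.length = [] := by simp
    have htake : text.toList.reverse.take text.toList.length = text.toList.reverse := by
      rw [← List.length_reverse, List.take_length]
    have hrange : PySem.List.pyRange (text.toList.length : Int) (text.toList.length : Int) 1
        = [] := by simp [PySem.List.pyRange]
    rw [hdrop, htake, hrange]
    rfl
  | succ k ih =>
    intro j hj hfuel
    have hjn : j < text.toList.length := by omega
    have hjr : j < text.toList.reverse.length := by simpa using hjn
    rw [List.drop_eq_getElem_cons hjr]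
    rw [PySem.List.pyRange_one_cons (by exact_mod_cast hjn)]
    simp only [spLoopA, spLoopB]
    rw [cond_eq text j]
    by_cases hc : PySem.Str.startswith text
        (PySem.Str.slice (String.ofList text.toList.reverse) (some (j : Int)) none) = true
    · rw [if_pos hc, if_pos hc]
      apply String.toList_inj.mp
      simp [PySem.Str.toList_slice, PySem.Chars.slice_eq_listSlice, PySem.List.slice_to_natCast]
    · rw [if_neg hc, if_neg hc]
      have hpush : (String.ofList (text.toList.reverse.take j)).push
            (text.toList.reverse[j]'hjr)
          = String.ofList (text.toList.reverse.take (j + 1)) := by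
        apply String.toList_inj.mp
        simp only [String.toList_push, String.toList_ofList]
        rw [List.take_add_one, List.getElem?_eq_getElem hjr]
        simp
      rw [hpush]
      have hcast : ((j : Int) + 1) = (((j + 1 : Nat)) : Int) := by push_cast; ring
      rw [hcast]
      exact ih (j + 1) (by omega) (by omega)

-- ===== VERDICT (by name: the statement is the Claim_ definition above) =====
theorem shortest_palindromizing_prefix_spec : Claim_equal_shortest_palindromizing_prefix := by
  intro text _
  unfold Spec_shortest_palindromizing_prefix
  unfold shortest_palindromizing_prefix shortest_palindromizing_prefix_alt
  rw [PySem.Str.slice?_none_none_neg_one]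
  have h := loop_eq text text.toList.length 0 (Nat.zero_le _) (by omega)
  simp only [List.drop_zero, List.take_zero, Nat.cast_zero] at h
  have hempty : String.ofList ([] : List Char) = "" := rfl
  rw [hempty] at h
  rw [h, PySem.Str.len_eq]
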